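-- pv_equiv track=rewrite | github.com/junseong2im/innovative_perfume_ai | add_real_perfumes_simple.py | find_note_id
-- ===== SOURCE A (Python) =====
-- def find_note_id(note_name, available_notes):
--     """향료명으로 ID 찾기"""
--     # 소문자 변환 + 공백과 하이픈을 언더스코어로
--     note_name_clean = note_name.strip().lower().replace(' ', '_').replace('-', '_')
--
--     for note_id, db_name in available_notes:
--         db_name_clean = db_name.strip().lower()
--
--         # 정확히 일치
--         if note_name_clean == db_name_clean:
--             return note_id
--
--     # 정확히 일치하지 않으면 부분 매칭
--     for note_id, db_name in available_notes:
--         db_name_clean = db_name.strip().lower()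
--
--         # 부분 일치 (언더스코어 제거 후)
--         note_simple = note_name_clean.replace('_', '')
--         db_simple = db_name_clean.replace('_', '')
--
--         if note_simple == db_simple:
--             return note_id
--
--         if note_simple in db_simple or db_simple in note_simple:
--             return note_id
--
--     return None
-- ===== SOURCE B (Python) =====
-- def find_note_id(note_name, available_notes):
--     """향료명으로 ID 찾기 — single pass: exact match returns at once, first fallback match is remembered."""
--     note_name_clean = note_name.strip().lower().replace(' ', '_').replace('-', '_')
--     note_simple = note_name_clean.replace('_', '')
--     fallback = None
--     for note_id, db_name in available_notes:
--         db_name_clean = db_name.strip().lower()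
--         if note_name_clean == db_name_clean:
--             return note_id
--         if fallback is None:
--             db_simple = db_name_clean.replace('_', '')
--             if note_simple == db_simple or note_simple in db_simple or db_simple in note_simple:
--                 fallback = note_id
--     return fallback
-- ===== Notes on version B (the rewrite author's own statement) =====
-- stated objective: alternative
-- what changed: Replaces A's two full scans by a single pass with an accumulator: an exact match returns at once, while the first fallback (simplified-equality/substring) match is remembered and returned only after the whole scan.
import Mathlib
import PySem

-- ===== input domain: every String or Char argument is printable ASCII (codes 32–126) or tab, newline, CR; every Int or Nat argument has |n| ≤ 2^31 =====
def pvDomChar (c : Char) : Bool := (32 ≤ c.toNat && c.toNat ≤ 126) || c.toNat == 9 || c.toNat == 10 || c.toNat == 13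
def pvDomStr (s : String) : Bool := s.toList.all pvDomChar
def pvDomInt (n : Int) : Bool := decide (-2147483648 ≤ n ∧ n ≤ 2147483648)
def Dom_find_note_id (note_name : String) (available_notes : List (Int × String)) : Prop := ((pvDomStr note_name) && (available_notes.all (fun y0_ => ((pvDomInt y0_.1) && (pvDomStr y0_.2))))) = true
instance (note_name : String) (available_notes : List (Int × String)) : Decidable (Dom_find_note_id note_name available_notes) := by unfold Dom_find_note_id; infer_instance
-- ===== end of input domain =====

-- B is one pass instead of A's two: exact match returns at once, the first fallback match is
-- remembered in an accumulator and returned only after the whole scan.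

-- ===== PORT A =====
-- db_name.strip().lower()
def fniDbClean (s : String) : String := PySem.Str.lower (PySem.Str.strip s)

-- first loop of A: exact match on cleaned names
def fniLoop1 (nc : String) : List (Int × String) → Option Int
  | [] => none
  | (note_id, db_name) :: rest =>
      if nc == fniDbClean db_name then some note_id else fniLoop1 nc rest

-- second loop of A: simplified-equality / substring fallback
def fniLoop2 (nc : String) : List (Int × String) → Option Int
  | [] => none
  | (note_id, db_name) :: rest =>
      let db_name_clean := fniDbClean db_name
      let note_simple := PySem.Str.replace nc "_" ""
      let db_simple := PySem.Str.replace db_name_clean "_" ""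
      if note_simple == db_simple then some note_id
      else if PySem.Str.isIn note_simple db_simple || PySem.Str.isIn db_simple note_simple then some note_id
      else fniLoop2 nc rest

def find_note_id (note_name : String) (available_notes : List (Int × String)) : Option Int :=
  let nc := PySem.Str.replace (PySem.Str.replace (PySem.Str.lower (PySem.Str.strip note_name)) " " "_") "-" "_"
  match fniLoop1 nc available_notes with
  | some note_id => some note_id
  | none => fniLoop2 nc available_notes

-- ===== PORT B =====
-- single pass with a fallback accumulator
def fniGo (nc ns : String) : List (Int × String) → Option Int → Option Int
  | [], fallback => fallback
  | (note_id, db_name) :: rest, fallback =>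
      let db_name_clean := fniDbClean db_name
      if nc == db_name_clean then some note_id
      else
        let fallback' :=
          if fallback.isNone then
            let db_simple := PySem.Str.replace db_name_clean "_" ""
            if ns == db_simple || PySem.Str.isIn ns db_simple || PySem.Str.isIn db_simple ns then
              some note_id
            else fallback
          else fallback
        fniGo nc ns rest fallback'

def find_note_id_alt (note_name : String) (available_notes : List (Int × String)) : Option Int :=
  let nc := PySem.Str.replace (PySem.Str.replace (PySem.Str.lower (PySem.Str.strip note_name)) " " "_") "-" "_"
  let ns := PySem.Str.replace nc "_" ""
  fniGo nc ns available_notes none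

-- ===== PRECONDITION & SPEC =====
def Spec_find_note_id (note_name : String) (available_notes : List (Int × String)) (out : Option Int) : Prop := out = find_note_id_alt note_name available_notes
instance (note_name : String) (available_notes : List (Int × String)) (out : Option Int) : Decidable (Spec_find_note_id note_name available_notes out) := by unfold Spec_find_note_id; infer_instance

-- ===== CLAIM (what is proved, stated in full; the proofs are below) =====
def Claim_equal_find_note_id : Prop := ∀ (note_name : String) (available_notes : List (Int × String)), Dom_find_note_id note_name available_notes → Spec_find_note_id note_name available_notes (find_note_id note_name available_notes)

-- ===== LEMMAS AND PROOFS =====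

-- the single pass equals: exact-scan result, else the incoming fallback, else the fallback-scan result
theorem fniGo_eq (nc : String) (l : List (Int × String)) (fb : Option Int) :
    fniGo nc (PySem.Str.replace nc "_" "") l fb =
      match fniLoop1 nc l with
      | some i => some i
      | none => match fb with
                | some j => some j
                | none => fniLoop2 nc l := by
  induction l generalizing fb with
  | nil => cases fb <;> rfl
  | cons p rest ih =>
    obtain ⟨note_id, db_name⟩ := p
    cases hx : (nc == fniDbClean db_name) with
    | true => simp [fniGo, fniLoop1, hx]
    | false =>
      cases fb with
      | some j => simp [fniGo, fniLoop1, hx, ih]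
      | none =>
        cases e1 : (PySem.Str.replace nc "_" "" == PySem.Str.replace (fniDbClean db_name) "_" "") <;>
        cases e2 : PySem.Chars.isIn (PySem.Chars.replace nc.toList ['_'] []) (PySem.Chars.replace (fniDbClean db_name).toList ['_'] []) <;>
        cases e3 : PySem.Chars.isIn (PySem.Chars.replace (fniDbClean db_name).toList ['_'] []) (PySem.Chars.replace nc.toList ['_'] []) <;>
        simp [fniGo, fniLoop1, fniLoop2, hx, e1, e2, e3, ih]

-- ===== VERDICT (by name: the statement is the Claim_ definition above) =====
theorem find_note_id_spec : Claim_equal_find_note_id := by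
  intro note_name available_notes _
  unfold Spec_find_note_id find_note_id find_note_id_alt
  rw [fniGo_eq]
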